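-- pv_equiv track=rewrite | github.com/baesh3744/algorithm-solutions | baekjoon/17000/17938.py | get_hand_location
-- ===== SOURCE A (Python) =====
-- def get_hand_location(n: int, t: int) -> tuple[int, int]:
--     start, cnt_hand, hand_diff = 0, 1, 1
--     for _ in range(t - 1):
--         start += cnt_hand
--         if cnt_hand == 2*n:
--             hand_diff = -1
--         elif cnt_hand == 1:
--             hand_diff = 1
--         cnt_hand += hand_diff
--     return start % (2*n), (start + cnt_hand - 1) % (2*n)
-- ===== SOURCE B (Python) =====
-- def get_hand_location(n: int, t: int) -> tuple[int, int]:
--     k = t - 1 if t > 1 else 0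
--     if n >= 1:
--         q, r = divmod(k, 4 * n - 2)
--         full = q * (4 * n * n - 1)
--         if r < 2 * n:
--             start = full + r * (r + 1) // 2
--             cnt = r + 1
--         else:
--             start = full + n * (2 * n + 1) + (r - 2 * n) * (6 * n - 1 - r) // 2
--             cnt = 4 * n - 1 - r
--     else:
--         start = k * (k + 1) // 2
--         cnt = k + 1
--     return start % (2 * n), (start + cnt - 1) % (2 * n)
-- ===== Notes on version B (the rewrite author's own statement) =====
-- stated objective: faster
-- what changed: Replaces A's step-by-step simulation of the zigzag counter over t-1 iterations by an O(1) closed form: the counter is periodic with period 4n-2, so position and counter are computed with divmod and triangular-number formulas.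
import Mathlib
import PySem

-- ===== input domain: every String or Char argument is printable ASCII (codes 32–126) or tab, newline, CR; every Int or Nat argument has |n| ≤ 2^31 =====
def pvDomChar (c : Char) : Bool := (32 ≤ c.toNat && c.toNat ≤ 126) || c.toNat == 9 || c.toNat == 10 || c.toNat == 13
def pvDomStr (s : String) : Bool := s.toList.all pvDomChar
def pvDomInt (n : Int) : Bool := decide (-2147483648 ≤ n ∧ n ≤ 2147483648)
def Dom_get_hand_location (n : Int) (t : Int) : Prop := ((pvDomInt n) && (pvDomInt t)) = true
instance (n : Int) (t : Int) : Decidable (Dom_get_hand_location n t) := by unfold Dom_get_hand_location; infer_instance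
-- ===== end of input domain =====

-- B replaces A's step-by-step simulation of the zigzag counter by closed-form modular
-- arithmetic exploiting its period 4n-2 (measured faster at the large sizes).

-- ===== PORT A =====
-- A's loop, literally A's loop body, run for `fuel` iterations on the state
-- (start, cnt_hand, hand_diff); tail-recursive like the Python for-loop
def pvLoopA (n : Int) (fuel : Nat) (p : Int × Int × Int) : Int × Int × Int :=
  match fuel with
  | 0 => p
  | f+1 =>
    let s := p.1 + p.2.1
    let d := if p.2.1 = 2*n then -1 else if p.2.1 = 1 then 1 else p.2.2
    pvLoopA n f (s, (p.2.1 + d, d))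

def get_hand_location (n : Int) (t : Int) : Int × Int :=
  let p := pvLoopA n (t - 1).toNat (0, 1, 1)
  (PySem.Int.mod p.1 (2*n), PySem.Int.mod (p.1 + p.2.1 - 1) (2*n))

-- ===== PORT B =====
def get_hand_location_alt (n : Int) (t : Int) : Int × Int :=
  let k : Int := if t > 1 then t - 1 else 0
  let res : Int × Int :=
    if 1 ≤ n then
      let q := PySem.Int.floordiv k (4*n - 2)
      let r := PySem.Int.mod k (4*n - 2)
      let full := q * (4*n*n - 1)
      if r < 2*n then
        (full + PySem.Int.floordiv (r*(r+1)) 2, r + 1)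
      else
        (full + n*(2*n+1) + PySem.Int.floordiv ((r - 2*n)*(6*n - 1 - r)) 2, 4*n - 1 - r)
    else
      (PySem.Int.floordiv (k*(k+1)) 2, k + 1)
  (PySem.Int.mod res.1 (2*n), PySem.Int.mod (res.1 + res.2 - 1) (2*n))

-- ===== PRECONDITION & SPEC =====
-- Pre_ excludes exactly n = 0, on which Python A raises ZeroDivisionError (start % (2*n)).
def Pre_get_hand_location (n : Int) (t : Int) : Prop := n ≠ 0
instance (n : Int) (t : Int) : Decidable (Pre_get_hand_location n t) := by unfold Pre_get_hand_location; infer_instance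
def pvWitness_get_hand_location : Int × Int := (2, 5)

def Spec_get_hand_location (n : Int) (t : Int) (out : Int × Int) : Prop := out = get_hand_location_alt n t
instance (n : Int) (t : Int) (out : Int × Int) : Decidable (Spec_get_hand_location n t out) := by unfold Spec_get_hand_location; infer_instance

-- ===== CLAIM (what is proved, stated in full; the proofs are below) =====
def Claim_equal_get_hand_location : Prop := ∀ (n : Int) (t : Int), Dom_get_hand_location n t → Pre_get_hand_location n t → Spec_get_hand_location n t (get_hand_location n t)

-- ===== LEMMAS AND PROOFS =====

-- the zigzag counter value after r steps within one period (n = N ≥ 1)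
def pvCval (N : Nat) (r : Nat) : Int := if r < 2*N then (r:Int) + 1 else 4*(N:Int) - 1 - (r:Int)

-- the diff value after k steps, where r = k % (4N-2)
def pvDval (N : Nat) (k : Nat) (r : Nat) : Int := if k = 0 then 1 else if 1 ≤ r ∧ r ≤ 2*N - 1 then 1 else -1

-- prefix sums of the counter values within one period
def pvPre (N : Nat) : Nat → Int
  | 0 => 0
  | r+1 => pvPre N r + pvCval N r

-- triangular numbers (the n ≤ 0 case, where the counter just counts up)
def pvTri : Nat → Int
  | 0 => 0
  | k+1 => pvTri k + ((k:Int) + 1)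

lemma pvFloordiv_two_mul (x : Int) : PySem.Int.floordiv (2 * x) 2 = x := by
  rw [PySem.Int.floordiv_eq_ediv_of_pos (by norm_num)]
  exact Int.mul_ediv_cancel_left x (by norm_num)

lemma pvTri_two (k : Nat) : 2 * pvTri k = (k:Int) * ((k:Int) + 1) := by
  induction k with
  | zero => simp [pvTri]
  | succ k ih => simp only [pvTri]; push_cast; ring_nf; ring_nf at ih; omega

lemma pvPre_two (N : Nat) (hN : 1 ≤ N) : ∀ r : Nat, r ≤ 4*N - 2 →
    2 * pvPre N r =
      (if r < 2*N then (r:Int) * ((r:Int)+1)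
       else 2*(N:Int)*(2*(N:Int)+1) + ((r:Int) - 2*N) * (6*(N:Int) - 1 - (r:Int))) := by
  intro r
  induction r with
  | zero => intro _; rw [if_pos (by omega)]; simp [pvPre]
  | succ r ih =>
    intro hr
    have ih' := ih (by omega)
    simp only [pvPre, pvCval] at *
    rcases lt_trichotomy (r+1) (2*N) with h | h | h
    · rw [if_pos (by omega)] at ih' ⊢
      rw [if_pos (by omega)]
      push_cast
      linear_combination ih'
    · rw [if_pos (by omega)] at ih'
      rw [if_pos (by omega), if_neg (by omega)]
      have hrN : (r:Int) = 2*(N:Int) - 1 := by omega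
      push_cast
      linear_combination ih' + (2*(r:Int) - 4*(N:Int) + 4) * hrN
    · rw [if_neg (by omega)] at ih'
      rw [if_neg (by omega), if_neg (by omega)]
      push_cast
      linear_combination ih'

lemma pvPre_total (N : Nat) (hN : 1 ≤ N) : pvPre N (4*N - 2) = 4*(N:Int)*(N:Int) - 1 := by
  have h := pvPre_two N hN (4*N - 2) le_rfl
  rw [if_neg (by omega)] at h
  have hc : ((4*N - 2 : Nat) : Int) = 4*(N:Int) - 2 := by omega
  rw [hc] at h
  have h2 : 2 * pvPre N (4*N - 2) = 2 * (4*(N:Int)*(N:Int) - 1) := by linear_combination h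
  exact mul_left_cancel₀ two_ne_zero h2

-- one iteration of A's loop body
def pvStep (n : Int) (p : Int × Int × Int) : Int × Int × Int :=
  let d := if p.2.1 = 2*n then -1 else if p.2.1 = 1 then 1 else p.2.2
  (p.1 + p.2.1, (p.2.1 + d, d))

lemma pvLoopA_succ (n : Int) : ∀ (f : Nat) (p : Int × Int × Int),
    pvLoopA n (f+1) p = pvStep n (pvLoopA n f p) := by
  intro f
  induction f with
  | zero => intro p; rfl
  | succ f ih =>
    intro p
    show pvLoopA n (f+1) _ = pvStep n (pvLoopA n (f+1) p)
    rw [ih, show pvLoopA n (f+1) p = pvLoopA n f _ from rfl]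

lemma pvLoopA_neg (n : Int) (hn : n ≤ 0) : ∀ k : Nat, pvLoopA n k (0, 1, 1) = (pvTri k, ((k:Int) + 1, 1)) := by
  intro k
  induction k with
  | zero => simp [pvLoopA, pvTri]
  | succ k ih =>
    rw [pvLoopA_succ, ih]
    simp only [pvStep, pvTri]
    have h2 : ((k:Int) + 1) ≠ 2*n := by omega
    have h1 : ((k:Int) + 1 = 1) ↔ (k = 0) := by omega
    rcases Nat.eq_zero_or_pos k with hk | hk
    · subst hk; simp; omega
    · rw [if_neg h2, if_neg (by omega)]
      simp only [Prod.mk.injEq]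
      push_cast
      simp


lemma pvLoopA_pos (N : Nat) (hN : 1 ≤ N) : ∀ k : Nat,
    pvLoopA (N:Int) k (0, 1, 1) =
      (((k / (4*N - 2) : Nat) : Int) * (4*(N:Int)*(N:Int) - 1) + pvPre N (k % (4*N - 2)),
       (pvCval N (k % (4*N - 2)), pvDval N k (k % (4*N - 2)))) := by
  intro k
  have hP : 0 < 4*N - 2 := by omega
  induction k with
  | zero =>
    simp [pvLoopA, pvPre, pvCval, pvDval, Nat.mod_eq_of_lt hP, Nat.div_eq_of_lt hP]
    omega
  | succ k ih =>
    set P := 4*N - 2 with hPdef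
    have hrlt : k % P < P := Nat.mod_lt _ hP
    set r := k % P with hrdef
    set q := k / P with hqdef
    have hk0 : k = 0 → r = 0 := by intro h; subst h; simp [hrdef]
    have hrk : r ≤ k := Nat.mod_le k P
    have hsplit : P * q + r = k := by rw [hqdef, hrdef]; exact Nat.div_add_mod k P
    clear_value P r q
    clear hrdef hqdef
    rcases Nat.lt_or_ge (r + 1) P with hcase | hcase
    · -- no wrap: (k+1) % P = r + 1, (k+1) / P = q
      have hmod : (k+1) % P = r + 1 := by
        conv_lhs => rw [show k + 1 = P * q + (r + 1) by omega]
        rw [Nat.mul_add_mod, Nat.mod_eq_of_lt hcase]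
      have hdiv : (k+1) / P = q := by
        conv_lhs => rw [show k + 1 = P * q + (r + 1) by omega]
        rw [Nat.mul_add_div hP, Nat.div_eq_of_lt hcase, Nat.add_zero]
      rw [pvLoopA_succ, ih]
      simp only [pvStep, hmod, hdiv]
      refine Prod.ext ?_ (Prod.ext ?_ ?_)
      · simp only [pvPre]; ring
      · simp only [pvCval, pvDval]
        split_ifs <;> omega
      · simp only [pvCval, pvDval]
        split_ifs <;> omega
    · -- wrap: r = P - 1, (k+1) % P = 0, (k+1) / P = q + 1
      have hr : r = P - 1 := by omega
      have hk1 : k + 1 = P * (q + 1) := by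
        have hq1 : P * (q + 1) = P * q + P := by ring
        omega
      have hmod : (k+1) % P = 0 := by rw [hk1]; exact Nat.mul_mod_right _ _
      have hdiv : (k+1) / P = q + 1 := by rw [hk1]; exact Nat.mul_div_cancel_left _ hP
      have htot : pvPre N P = 4*(N:Int)*(N:Int) - 1 := by rw [hPdef]; exact pvPre_total N hN
      have hstep : pvPre N (P - 1) + pvCval N (P - 1) = 4*(N:Int)*(N:Int) - 1 := by
        have hps : P = (P - 1) + 1 := by omega
        rw [hps] at htot
        simpa [pvPre] using htot
      rw [pvLoopA_succ, ih]
      simp only [pvStep, hmod, hdiv, hr]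
      refine Prod.ext ?_ (Prod.ext ?_ ?_)
      · simp only [pvPre]
        push_cast
        linear_combination hstep
      · simp only [pvCval, pvDval]
        split_ifs <;> omega
      · simp only [pvCval, pvDval]
        split_ifs <;> omega

-- ===== VERDICT (by name: the statement is the Claim_ definition above) =====
theorem get_hand_location_spec : Claim_equal_get_hand_location := by
  intro n t _ hpre
  unfold Spec_get_hand_location get_hand_location get_hand_location_alt
  have hkeq : (if t > (1:Int) then t - 1 else 0) = (((t-1).toNat : Nat) : Int) := by
    split_ifs <;> omega
  rw [hkeq]
  generalize (t-1).toNat = K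
  dsimp only
  rcases Int.lt_or_le n 0 with hneg | hpos
  · rw [if_neg (by omega), pvLoopA_neg n (by omega) K]
    rw [show ((K:Int)) * ((K:Int)+1) = 2 * pvTri K from (pvTri_two K).symm, pvFloordiv_two_mul]
  · obtain ⟨N, rfl⟩ : ∃ N : Nat, n = (N:Int) := ⟨n.toNat, (Int.toNat_of_nonneg hpos).symm⟩
    have hN : 1 ≤ N := by
      have : (N:Int) ≠ 0 := hpre
      omega
    rw [if_pos (by exact_mod_cast hN), pvLoopA_pos N hN K]
    rw [show (4*(N:Int) - 2) = ((4*N-2 : Nat) : Int) by omega]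
    rw [PySem.Int.floordiv_natCast, PySem.Int.mod_natCast]
    have hRlt : K % (4*N-2) < 4*N-2 := Nat.mod_lt _ (by omega)
    set R := K % (4*N-2) with hRdef
    set Q := K / (4*N-2) with hQdef
    clear_value R Q
    have h2 := pvPre_two N hN R (by omega)
    by_cases hbr : ((R:Int)) < 2*(N:Int)
    · rw [if_pos hbr]
      rw [if_pos (by omega : R < 2*N)] at h2
      rw [show ((R:Int)) * ((R:Int)+1) = 2 * pvPre N R from h2.symm, pvFloordiv_two_mul]
      rw [pvCval, if_pos (by omega : R < 2*N)]
    · rw [if_neg hbr]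
      rw [if_neg (by omega : ¬ R < 2*N)] at h2
      have h3 : ((R:Int) - 2*(N:Int)) * (6*(N:Int) - 1 - (R:Int))
          = 2 * (pvPre N R - (N:Int)*(2*(N:Int)+1)) := by linear_combination -h2
      rw [h3, pvFloordiv_two_mul]
      rw [pvCval, if_neg (by omega : ¬ R < 2*N)]
      have harg : (Q:Int) * (4*(N:Int)*(N:Int) - 1) + (N:Int)*(2*(N:Int)+1)
          + (pvPre N R - (N:Int)*(2*(N:Int)+1))
          = (Q:Int) * (4*(N:Int)*(N:Int) - 1) + pvPre N R := by ring
      rw [harg]
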